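-- pv_equiv track=rewrite | github.com/JaiEnfer/ai-job-agent | app/services/cv_generator.py | split_text_to_points
-- ===== SOURCE A (Python) =====
-- from typing import List
--
-- def split_text_to_points(text: str) -> List[str]:
--     if not text:
--         return []
--
--     separators = ["\n", ".", ";"]
--     chunks = [text]
--
--     for sep in separators:
--         new_chunks = []
--         for chunk in chunks:
--             new_chunks.extend(chunk.split(sep))
--         chunks = new_chunks
--
--     cleaned = [chunk.strip() for chunk in chunks if chunk.strip()]
--     return cleaned
-- ===== SOURCE B (Python) =====
-- from typing import List
--
-- def split_text_to_points(text: str) -> List[str]: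
--     # Single left-to-right scan: flush the current fragment at each separator.
--     points: List[str] = []
--     cur: List[str] = []
--     for ch in text:
--         if ch in "\n.;":
--             frag = "".join(cur).strip()
--             if frag:
--                 points.append(frag)
--             cur = []
--         else:
--             cur.append(ch)
--     frag = "".join(cur).strip()
--     if frag:
--         points.append(frag)
--     return points
-- ===== Notes on version B (the rewrite author's own statement) =====
-- stated objective: alternative
-- what changed: A makes three successive passes that split every chunk on one separator and rebuild the chunk list each time, then strips and filters; B does one left-to-right scan over the characters, flushing the stripped current fragment whenever it meets any of the three separators.
import Mathlib
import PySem

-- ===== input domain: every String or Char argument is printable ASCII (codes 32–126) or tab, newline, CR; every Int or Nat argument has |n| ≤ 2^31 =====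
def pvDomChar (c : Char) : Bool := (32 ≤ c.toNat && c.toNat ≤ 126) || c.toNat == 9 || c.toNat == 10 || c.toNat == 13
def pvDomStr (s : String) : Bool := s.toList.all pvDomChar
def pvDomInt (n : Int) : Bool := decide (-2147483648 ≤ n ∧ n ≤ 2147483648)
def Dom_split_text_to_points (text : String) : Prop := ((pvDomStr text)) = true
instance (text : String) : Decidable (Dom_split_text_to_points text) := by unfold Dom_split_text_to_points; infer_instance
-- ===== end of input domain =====

-- B replaces A's three successive split-and-rebuild passes over the chunk list by one
-- left-to-right scan over the characters that flushes the current fragment at each separator (objective: alternative).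

-- ===== PORT A =====
def split_text_to_points (text : String) : List String :=
  if text.toList.isEmpty then []
  else
    let chunks :=
      ["\n", ".", ";"].foldl
        (fun chunks sep =>
          chunks.foldl
            (fun newChunks chunk => newChunks ++ ((PySem.Str.split? chunk sep).getD []))
            [])
        [text]
    chunks.filterMap (fun chunk =>
      let s := PySem.Str.strip chunk
      if s.toList.isEmpty then none else some s)

-- ===== PORT B =====
-- 'ch in "\n.;"'
def pvSep (ch : Char) : Bool := ch == '\n' || ch == '.' || ch == ';'

-- the body of B's for-loop: flush the stripped current fragment at a separator, else extend it
def pvStep (st : List String × List Char) (ch : Char) : List String × List Char :=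
  if pvSep ch then
    let frag := PySem.Chars.strip st.2
    (if frag.isEmpty then st.1 else st.1 ++ [String.ofList frag], [])
  else (st.1, st.2 ++ [ch])

-- the final flush after the loop
def pvFinish (st : List String × List Char) : List String :=
  let frag := PySem.Chars.strip st.2
  if frag.isEmpty then st.1 else st.1 ++ [String.ofList frag]

def split_text_to_points_alt (text : String) : List String :=
  pvFinish (text.toList.foldl pvStep ([], []))

-- ===== PRECONDITION & SPEC =====
def Spec_split_text_to_points (text : String) (out : List String) : Prop := out = split_text_to_points_alt text
instance (text : String) (out : List String) : Decidable (Spec_split_text_to_points text out) := by unfold Spec_split_text_to_points; infer_instance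

-- ===== CLAIM (what is proved, stated in full; the proofs are below) =====
def Claim_equal_split_text_to_points : Prop := ∀ (text : String), Dom_split_text_to_points text → Spec_split_text_to_points text (split_text_to_points text)

-- ===== LEMMAS AND PROOFS =====

-- reference splitter: cut the character list at every character satisfying p
def pvSplitP (p : Char → Bool) : List Char → List (List Char)
  | [] => [[]]
  | c :: rest =>
    if p c then [] :: pvSplitP p rest
    else List.modifyHead (fun h => c :: h) (pvSplitP p rest)

theorem pvModifyHead_id {α : Type} (l : List (List α)) :
    List.modifyHead (fun h => h) l = l := by
  simp [show (fun (h : List α) => h) = id from rfl]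

-- the final strip-and-filter cleanup, on character-list fragments
def pvClean (fs : List (List Char)) : List String :=
  fs.filterMap (fun f =>
    let s := PySem.Chars.strip f
    if s.isEmpty then none else some (String.ofList s))

theorem pvSplitP_ne_nil (p : Char → Bool) (l : List Char) : pvSplitP p l ≠ [] := by
  induction l with
  | nil => simp [pvSplitP]
  | cons c rest ih =>
    simp only [pvSplitP]
    split
    · simp
    · cases hs : pvSplitP p rest with
      | nil => exact absurd hs ih
      | cons h t => simp [hs]

theorem pvGo_single (c : Char) (l : List Char) : ∀ (fuel : Nat) (cur : List Char)
    (acc : List (List Char)), l.length < fuel →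
    PySem.Chars.splitOn.go [c] fuel l cur acc =
      acc.reverse ++ List.modifyHead (fun h => cur.reverse ++ h) (pvSplitP (· == c) l) := by
  induction l with
  | nil =>
    intro fuel cur acc hf
    obtain ⟨f, rfl⟩ : ∃ f, fuel = f + 1 := ⟨fuel - 1, by omega⟩
    rw [PySem.Chars.splitOn.go.eq_def]
    simp [pvSplitP]
  | cons ch rest ih =>
    intro fuel cur acc hf
    obtain ⟨f, rfl⟩ : ∃ f, fuel = f + 1 := ⟨fuel - 1, by omega⟩
    rw [PySem.Chars.splitOn.go.eq_def]
    simp only [List.isPrefixOf, List.isPrefixOf_nil_left, Bool.and_true, List.length_cons] at *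
    by_cases hc : c = ch
    · subst hc
      simp only [beq_self_eq_true, if_pos, List.drop_succ_cons, List.drop_zero, pvSplitP,
        beq_self_eq_true, if_true, List.length_nil, List.drop_zero]
      rw [ih f [] (cur.reverse :: acc) (by omega)]
      simp [pvSplitP, show (fun (h : List Char) => h) = id from rfl]
    · have hc' : (c == ch) = false := by simp [hc]
      simp only [hc', Bool.false_eq_true, if_false, pvSplitP]
      have hch : (ch == c) = false := by simp [Ne.symm hc]
      rw [ih f (ch :: cur) acc (by omega)]
      simp only [hch, Bool.false_eq_true, if_false]
      obtain ⟨h, t, hht⟩ : ∃ h t, pvSplitP (· == c) rest = h :: t := by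
        cases hs : pvSplitP (· == c) rest with
        | nil => exact absurd hs (pvSplitP_ne_nil _ _)
        | cons h t => exact ⟨h, t, rfl⟩
      simp [hht]

theorem pvSplitOn_single (c : Char) (l : List Char) :
    PySem.Chars.splitOn l [c] = pvSplitP (· == c) l := by
  have := pvGo_single c l (l.length + 1) [] [] (by omega)
  simpa [PySem.Chars.splitOn, show (fun (h : List Char) => h) = id from rfl] using this

theorem pvSplitP_flatMap (p q : Char → Bool) (l : List Char) :
    (pvSplitP p l).flatMap (pvSplitP q) = pvSplitP (fun c => p c || q c) l := by
  induction l with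
  | nil => simp [pvSplitP]
  | cons c rest ih =>
    by_cases hp : p c = true
    · simp only [pvSplitP, hp, if_true, Bool.true_or, List.flatMap_cons]
      rw [← ih]
      simp [pvSplitP]
    · obtain ⟨h, t, hht⟩ : ∃ h t, pvSplitP p rest = h :: t := by
        cases hs : pvSplitP p rest with
        | nil => exact absurd hs (pvSplitP_ne_nil _ _)
        | cons h t => exact ⟨h, t, rfl⟩
      have hxp : p c = false := by simpa using hp
      have hihl : pvSplitP q h ++ t.flatMap (pvSplitP q) = pvSplitP (fun c => p c || q c) rest := by
        rw [← ih, hht]; simp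
      by_cases hq : q c = true
      · simp only [pvSplitP, hxp, Bool.false_eq_true, if_false, hht, List.modifyHead_cons,
          List.flatMap_cons, hq, Bool.or_true, if_true]
        rw [← hihl]
        simp [pvSplitP, hq]
      · have hxq : q c = false := by simpa using hq
        obtain ⟨h', t', hht'⟩ : ∃ h' t', pvSplitP q h = h' :: t' := by
          cases hs : pvSplitP q h with
          | nil => exact absurd hs (pvSplitP_ne_nil _ _)
          | cons h' t' => exact ⟨h', t', rfl⟩
        simp only [pvSplitP, hxp, hxq, Bool.false_eq_true, Bool.or_self, if_false, hht,
          List.modifyHead_cons, List.flatMap_cons, hht']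
        rw [← hihl, hht']
        simp

-- A's one pass for a single-character separator produces pvSplitP fragments
theorem pvStrSplit_single (s sep : String) (c : Char) (hsep : sep.toList = [c]) :
    (PySem.Str.split? s sep).getD [] = (pvSplitP (· == c) s.toList).map String.ofList := by
  simp [PySem.Str.split?, PySem.Chars.split?, hsep, pvSplitOn_single]

-- one whole pass of A's outer loop, on the char-list image
theorem pvPass (L : List (List Char)) (sep : String) (c : Char) (hsep : sep.toList = [c]) :
    (L.map String.ofList).foldl
        (fun newChunks chunk => newChunks ++ ((PySem.Str.split? chunk sep).getD [])) [] =
      (L.flatMap (pvSplitP (· == c))).map String.ofList := by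
  rw [PySem.List.foldl_append_eq_flatMap]
  simp only [List.nil_append, List.flatMap_map, List.map_flatMap]
  refine List.flatMap_congr ?_
  intro f _
  rw [pvStrSplit_single _ _ c hsep]
  simp

theorem pvSep_eq : (fun c => ((c == '\n' || c == '.') || c == ';')) = pvSep := by
  funext c
  simp [pvSep, Bool.or_assoc]

theorem pvClean_strip_nil : pvClean [[]] = [] := by
  decide

-- A computes pvClean of the pvSep fragments
theorem pvA_eq (text : String) :
    split_text_to_points text = pvClean (pvSplitP pvSep text.toList) := by
  by_cases hnil : text.toList = []
  · rw [split_text_to_points, if_pos (by simp [hnil]), hnil]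
    simp [pvSplitP, pvClean_strip_nil]
  · rw [split_text_to_points, if_neg (by simp [hnil])]
    simp only [List.foldl_cons, List.foldl_nil, List.nil_append]
    rw [pvStrSplit_single text "\n" '\n' rfl, pvPass _ "." '.' rfl, pvPass _ ";" ';' rfl]
    rw [pvSplitP_flatMap, pvSplitP_flatMap, pvSep_eq]
    rw [pvClean, List.filterMap_map]
    refine List.filterMap_congr ?_
    intro f _
    have hs : PySem.Str.strip (String.ofList f) = String.ofList (PySem.Chars.strip f) := by
      have := PySem.Str.toList_strip (String.ofList f)
      rw [String.toList_ofList] at this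
      conv_lhs => rw [← String.ofList_toList (s := PySem.Str.strip (String.ofList f))]
      rw [this]
    simp [hs, List.isEmpty_iff, Function.comp]

-- B's loop invariant: finishing after processing l yields the cleaned fragments of l,
-- with the pending fragment cur glued onto the first one
theorem pvB_loop (l : List Char) : ∀ (pts : List String) (cur : List Char),
    pvFinish (l.foldl pvStep (pts, cur)) =
      pts ++ pvClean (List.modifyHead (fun h => cur ++ h) (pvSplitP pvSep l)) := by
  induction l with
  | nil =>
    intro pts cur
    simp only [List.foldl_nil, pvFinish, pvSplitP, List.modifyHead_cons, pvClean,
      List.filterMap_cons]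
    split <;> simp_all
  | cons c rest ih =>
    intro pts cur
    by_cases hc : pvSep c = true
    · simp only [List.foldl_cons, pvStep, hc, if_true, pvSplitP]
      rw [ih]
      simp only [List.modifyHead_cons, List.nil_append, pvClean, List.filterMap_cons,
        List.append_nil]
      rw [pvModifyHead_id]
      split <;> simp_all [pvClean]
    · have hc' : pvSep c = false := by simpa using hc
      simp only [List.foldl_cons, pvStep, hc', Bool.false_eq_true, if_false, pvSplitP]
      rw [ih]
      obtain ⟨h, t, hht⟩ : ∃ h t, pvSplitP pvSep rest = h :: t := by
        cases hs : pvSplitP pvSep rest with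
        | nil => exact absurd hs (pvSplitP_ne_nil _ _)
        | cons h t => exact ⟨h, t, rfl⟩
      simp [hht]

theorem pvB_eq (text : String) :
    split_text_to_points_alt text = pvClean (pvSplitP pvSep text.toList) := by
  rw [split_text_to_points_alt, pvB_loop]
  simp only [List.nil_append, pvModifyHead_id]

-- ===== VERDICT (by name: the statement is the Claim_ definition above) =====
theorem split_text_to_points_spec : Claim_equal_split_text_to_points := by
  intro text _
  unfold Spec_split_text_to_points
  rw [pvA_eq, pvB_eq]
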